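-- pv_equiv track=rewrite | github.com/SuperCorleone/SMARTS | run_rq3.py | filter_configs
-- ===== SOURCE A (Python) =====
-- def filter_configs(configs, sample_filter=None, vars_filter=None):
--     out = configs
--     if sample_filter:
--         sample_filter = set(sample_filter)
--         out = [cfg for cfg in out if cfg[0] in sample_filter]
--     if vars_filter:
--         vars_filter = set(vars_filter)
--         out = [cfg for cfg in out if cfg[1] in vars_filter]
--     return out
-- ===== SOURCE B (Python) =====
-- def filter_configs(configs, sample_filter=None, vars_filter=None):
--     sf = set(sample_filter) if sample_filter else None
--     vf = set(vars_filter) if vars_filter else None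
--     if sf is None and vf is None:
--         return configs
--     return [cfg for cfg in configs
--             if (sf is None or cfg[0] in sf) and (vf is None or cfg[1] in vf)]
-- ===== Notes on version B (the rewrite author's own statement) =====
-- stated objective: alternative
-- what changed: Replaces A's two sequential filtering passes (each building an intermediate list) with one combined pass over configs using both precomputed membership sets, returning the input unchanged when no filter is active.
import Mathlib
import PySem

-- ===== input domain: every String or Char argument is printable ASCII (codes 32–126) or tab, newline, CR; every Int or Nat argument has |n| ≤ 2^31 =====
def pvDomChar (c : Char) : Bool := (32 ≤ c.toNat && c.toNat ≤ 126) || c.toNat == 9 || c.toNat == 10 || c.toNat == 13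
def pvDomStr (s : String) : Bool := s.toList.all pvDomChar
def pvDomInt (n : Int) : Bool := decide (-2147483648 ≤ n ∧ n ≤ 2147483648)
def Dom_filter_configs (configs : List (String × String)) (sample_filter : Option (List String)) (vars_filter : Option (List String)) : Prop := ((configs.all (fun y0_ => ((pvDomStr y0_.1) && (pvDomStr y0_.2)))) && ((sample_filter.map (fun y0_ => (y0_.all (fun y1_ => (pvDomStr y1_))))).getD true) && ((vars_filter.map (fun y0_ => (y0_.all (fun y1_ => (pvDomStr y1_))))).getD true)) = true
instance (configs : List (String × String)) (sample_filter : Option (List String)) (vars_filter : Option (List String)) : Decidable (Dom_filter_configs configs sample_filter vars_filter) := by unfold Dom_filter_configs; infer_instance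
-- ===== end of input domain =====

-- B replaces A's two sequential filtering passes with one combined pass using both precomputed sets (alternative decomposition, same cost).

-- ===== PORT A =====
-- Two sequential passes: if sample_filter is truthy, filter by it; then if vars_filter is truthy, filter by it.
def filter_configs (configs : List (String × String)) (sample_filter : Option (List String)) (vars_filter : Option (List String)) : List (String × String) :=
  let out := configs
  let out :=
    match sample_filter with
    | some l => if l.isEmpty then out else
        let s : PySem.Set String := PySem.Set.ofList l
        out.filter (fun cfg => PySem.Set.contains s cfg.1)
    | none => out
  let out :=
    match vars_filter with
    | some l => if l.isEmpty then out else
        let s : PySem.Set String := PySem.Set.ofList l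
        out.filter (fun cfg => PySem.Set.contains s cfg.2)
    | none => out
  out

-- ===== PORT B =====
-- Single pass: precompute the (optional) sets once; keep cfg iff it passes both active filters.
def filter_configs_alt (configs : List (String × String)) (sample_filter : Option (List String)) (vars_filter : Option (List String)) : List (String × String) :=
  let sf : Option (PySem.Set String) :=
    match sample_filter with
    | some l => if l.isEmpty then none else some (PySem.Set.ofList l)
    | none => none
  let vf : Option (PySem.Set String) :=
    match vars_filter with
    | some l => if l.isEmpty then none else some (PySem.Set.ofList l)
    | none => none
  match sf, vf with
  | none, none => configs
  | _, _ =>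
    configs.filter (fun cfg =>
      (match sf with | none => true | some s => PySem.Set.contains s cfg.1) &&
      (match vf with | none => true | some s => PySem.Set.contains s cfg.2))

-- ===== PRECONDITION & SPEC =====
def Spec_filter_configs (configs : List (String × String)) (sample_filter : Option (List String)) (vars_filter : Option (List String)) (out : List (String × String)) : Prop := out = filter_configs_alt configs sample_filter vars_filter
instance (configs : List (String × String)) (sample_filter : Option (List String)) (vars_filter : Option (List String)) (out : List (String × String)) : Decidable (Spec_filter_configs configs sample_filter vars_filter out) := by unfold Spec_filter_configs; infer_instance

-- ===== CLAIM (what is proved, stated in full; the proofs are below) =====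
def Claim_equal_filter_configs : Prop := ∀ (configs : List (String × String)) (sample_filter : Option (List String)) (vars_filter : Option (List String)), Dom_filter_configs configs sample_filter vars_filter → Spec_filter_configs configs sample_filter vars_filter (filter_configs configs sample_filter vars_filter)

-- ===== LEMMAS AND PROOFS =====
theorem filter_true (l : List (String × String)) :
    l.filter (fun _ => true) = l := List.filter_true l

-- ===== VERDICT (by name: the statement is the Claim_ definition above) =====
theorem filter_configs_spec : Claim_equal_filter_configs := by
  intro configs sample_filter vars_filter _
  unfold Spec_filter_configs filter_configs filter_configs_alt
  rcases sample_filter with _ | l₁ <;> rcases vars_filter with _ | l₂ <;>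
    simp only [] <;> try rfl
  · split_ifs <;> simp [List.filter_true]
  · split_ifs <;> simp [List.filter_true]
  · split_ifs <;> simp [List.filter_filter, List.filter_true, Bool.and_comm]
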